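-- pv_equiv track=rewrite | github.com/KrishnaPrabha12d/Cognitive_databases | tutor/knowledge_state/dkt/build_skill_item_map.py | find_best_item
-- ===== SOURCE A (Python) =====
-- def find_best_item(skill: str, items: list[str]) -> str | None:
--     s = skill.lower()
--     # Try keyword match (contains)
--     for it in items:
--         if s in str(it).lower():
--             return str(it)
--
--     # Try softer match: first 4 letters
--     key = s[:4]
--     for it in items:
--         if key in str(it).lower():
--             return str(it)
--
--     return None
-- ===== SOURCE B (Python) =====
-- def find_best_item(skill: str, items: list[str]) -> str | None:
--     s = skill.lower()
--     key = s[:4]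
--     fallback = None
--     for it in items:
--         low = str(it).lower()
--         if s in low:
--             return str(it)
--         if fallback is None and key in low:
--             fallback = str(it)
--     return fallback
-- ===== Notes on version B (the rewrite author's own statement) =====
-- stated objective: simpler
-- what changed: Replaces A's two sequential scans (full match pass, then prefix pass that re-lowercases every item) with a single loop that lowercases each item once, returns on the first full match, and remembers the first prefix match as a fallback.
import Mathlib
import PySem

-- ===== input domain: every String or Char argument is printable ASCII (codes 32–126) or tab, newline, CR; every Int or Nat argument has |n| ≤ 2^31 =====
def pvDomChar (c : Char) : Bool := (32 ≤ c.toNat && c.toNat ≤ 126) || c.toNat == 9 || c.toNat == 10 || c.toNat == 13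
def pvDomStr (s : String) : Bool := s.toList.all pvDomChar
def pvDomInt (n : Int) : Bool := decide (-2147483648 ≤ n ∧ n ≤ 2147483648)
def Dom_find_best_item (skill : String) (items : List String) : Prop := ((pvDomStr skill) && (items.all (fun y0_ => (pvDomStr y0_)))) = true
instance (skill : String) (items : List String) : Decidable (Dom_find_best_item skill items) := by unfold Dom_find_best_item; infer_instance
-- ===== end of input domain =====

-- B is a single pass: lowercase each item once, return on the first full match,
-- remember the first prefix match as a fallback (objective: simpler).

-- ===== PORT A =====
-- first loop of A: return first item whose lowercase contains s
def pvA_loop1 (s : String) : List String → Option String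
  | [] => none
  | it :: rest =>
    if PySem.Str.isIn s (PySem.Str.lower it) then some it else pvA_loop1 s rest

-- second loop of A: return first item whose lowercase contains key
def pvA_loop2 (key : String) : List String → Option String
  | [] => none
  | it :: rest =>
    if PySem.Str.isIn key (PySem.Str.lower it) then some it else pvA_loop2 key rest

def find_best_item (skill : String) (items : List String) : Option String :=
  let s := PySem.Str.lower skill
  match pvA_loop1 s items with
  | some r => some r
  | none =>
    let key := PySem.Str.slice s none (some 4)
    pvA_loop2 key items

-- ===== PORT B =====
-- single loop carrying the fallback (first prefix match seen so far)
def pvB_loop (s key : String) (fallback : Option String) : List String → Option String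
  | [] => fallback
  | it :: rest =>
    let low := PySem.Str.lower it
    if PySem.Str.isIn s low then some it
    else
      pvB_loop s key
        (if fallback.isNone && PySem.Str.isIn key low then some it else fallback) rest

def find_best_item_alt (skill : String) (items : List String) : Option String :=
  let s := PySem.Str.lower skill
  let key := PySem.Str.slice s none (some 4)
  pvB_loop s key none items

-- ===== PRECONDITION & SPEC =====
def Spec_find_best_item (skill : String) (items : List String) (out : Option String) : Prop := out = find_best_item_alt skill items
instance (skill : String) (items : List String) (out : Option String) : Decidable (Spec_find_best_item skill items out) := by unfold Spec_find_best_item; infer_instance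

-- ===== CLAIM (what is proved, stated in full; the proofs are below) =====
def Claim_equal_find_best_item : Prop := ∀ (skill : String) (items : List String), Dom_find_best_item skill items → Spec_find_best_item skill items (find_best_item skill items)

-- ===== LEMMAS AND PROOFS =====
-- loop invariant: B's single pass equals "first full match, else fallback, else first prefix match"
theorem pvB_loop_eq (s key : String) (items : List String) (fb : Option String) :
    pvB_loop s key fb items =
      (pvA_loop1 s items).or (fb.or (pvA_loop2 key items)) := by
  induction items generalizing fb with
  | nil => cases fb <;> simp [pvB_loop, pvA_loop1, pvA_loop2]
  | cons it rest ih =>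
    simp only [pvB_loop, pvA_loop1, pvA_loop2, PySem.Str.isIn_eq]
    by_cases h1 : PySem.Chars.isIn s.toList (PySem.Chars.lower it.toList) = true
    · simp [h1]
    · simp only [h1, if_false, ih]
      cases fb <;>
        by_cases h2 : PySem.Chars.isIn key.toList (PySem.Chars.lower it.toList) = true <;>
          simp [h1, h2, Option.or]

-- ===== VERDICT (by name: the statement is the Claim_ definition above) =====
theorem find_best_item_spec : Claim_equal_find_best_item := by
  intro skill items _
  unfold Spec_find_best_item find_best_item find_best_item_alt
  rw [pvB_loop_eq]
  cases h : pvA_loop1 (PySem.Str.lower skill) items <;> simp [h, Option.or]
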